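-- pv_equiv track=rewrite | github.com/natsuki-kining/python-demo | interview-questions/leetcode/find-words-that-can-be-formed-by-characters.py | count_characters_2
-- ===== SOURCE A (Python) =====
-- import collections
--
-- def count_characters_2(words, chars):
--     ans = 0
--     # Counter类计数器 # Counter({'a': 2, 't': 1, 'c': 1, 'h': 1})
--     cnt = collections.Counter(chars)
--     for w in words:
--         # Counter({'c': 1, 'a': 1, 't': 1})
--         c = collections.Counter(w)
--         # all() 函数用于判断给定的可迭代参数 iterable 中的所有元素是否都为 TRUE，如果是返回 True，否则返回 False。
--         if all([c[i] <= cnt[i] for i in c]):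
--             ans += len(w)
--     return ans
-- ===== SOURCE B (Python) =====
-- def count_characters_2(words, chars):
--     pool = sorted(chars)
--     total = 0
--     for w in words:
--         t = sorted(w)
--         j = 0
--         for ch in pool:
--             if j < len(t) and t[j] == ch:
--                 j += 1
--         if j == len(t):
--             total += len(w)
--     return total
-- ===== Notes on version B (the rewrite author's own statement) =====
-- stated objective: alternative
-- what changed: B never builds a histogram at all: it sorts chars once and sorts each word, then decides formability by a greedy two-pointer subsequence scan of the sorted word through the sorted pool (multiset inclusion = sorted-subsequence), instead of A's per-word Counter compared key-by-key with all().
import Mathlib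
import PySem

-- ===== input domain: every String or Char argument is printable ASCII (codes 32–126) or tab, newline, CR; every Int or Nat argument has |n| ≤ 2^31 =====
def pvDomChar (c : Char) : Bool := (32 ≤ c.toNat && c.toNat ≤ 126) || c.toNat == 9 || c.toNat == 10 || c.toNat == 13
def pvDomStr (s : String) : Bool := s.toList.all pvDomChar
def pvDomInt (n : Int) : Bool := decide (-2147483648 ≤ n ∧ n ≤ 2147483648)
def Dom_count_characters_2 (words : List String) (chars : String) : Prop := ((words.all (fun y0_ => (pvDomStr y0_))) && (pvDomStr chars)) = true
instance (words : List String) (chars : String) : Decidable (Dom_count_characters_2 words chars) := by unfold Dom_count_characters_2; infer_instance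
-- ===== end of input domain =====

-- B decides formability by sorting and a greedy subsequence scan (multiset inclusion of sorted lists = sublist) instead of A's per-word Counter compared with all(); alternative algorithm, similar cost.


-- ===== PORT A =====
def count_characters_2 (words : List String) (chars : String) : Int :=
  let cnt := PySem.Dict.counter chars.toList
  words.foldl
    (fun ans w =>
      let c := PySem.Dict.counter w.toList
      if ((c.keys.map (fun i => decide (c.getD i 0 ≤ cnt.getD i 0))).all id)
      then ans + PySem.Str.len w
      else ans)
    0

-- ===== PORT B =====
def count_characters_2_alt (words : List String) (chars : String) : Int :=
  let pool := PySem.List.sorted chars.toList (fun c => c) false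
  words.foldl
    (fun total w =>
      let t := PySem.List.sorted w.toList (fun c => c) false
      let j := pool.foldl
        (fun j ch => if j < (t.length : Int) ∧ PySem.List.pyGet? t j = some ch then j + 1 else j) 0
      if j = (t.length : Int) then total + PySem.Str.len w else total)
    0

-- ===== PRECONDITION & SPEC =====
def Spec_count_characters_2 (words : List String) (chars : String) (out : Int) : Prop := out = count_characters_2_alt words chars
instance (words : List String) (chars : String) (out : Int) : Decidable (Spec_count_characters_2 words chars out) := by unfold Spec_count_characters_2; infer_instance

-- ===== CLAIM =====
def Claim_equal_count_characters_2 : Prop := ∀ (words : List String) (chars : String), Dom_count_characters_2 words chars → Spec_count_characters_2 words chars (count_characters_2 words chars)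

-- ===== LEMMAS AND PROOFS =====

-- proof-side recursive form of B's greedy two-pointer scan: the unmatched suffix of t after scanning pool
def pvGreedy : List Char → List Char → List Char
  | [], t => t
  | _ :: _, [] => []
  | ch :: pool, a :: t => if a = ch then pvGreedy pool t else pvGreedy pool (a :: t)

theorem pvGreedy_nil_right (pool : List Char) : pvGreedy pool [] = [] := by
  cases pool <;> rfl

-- B's index fold over pool computes t.length minus the unmatched remainder of t
theorem fold_eq_greedy (pool t : List Char) (j : Nat) (hj : j ≤ t.length) :
    pool.foldl
      (fun j ch => if j < (t.length : Int) ∧ PySem.List.pyGet? t j = some ch then j + 1 else j)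
      (j : Int)
    = (t.length : Int) - ((pvGreedy pool (t.drop j)).length : Int) := by
  induction pool generalizing j with
  | nil =>
    simp [pvGreedy]
    omega
  | cons ch pool ih =>
    simp only [List.foldl_cons]
    by_cases hjl : j < t.length
    · have hdrop : t.drop j = t[j] :: t.drop (j + 1) := List.drop_eq_getElem_cons hjl
      have hget : PySem.List.pyGet? t (j : Int) = some t[j] := by
        rw [PySem.List.pyGet?_natCast]
        simp [List.getElem?_eq_getElem hjl]
      by_cases hch : t[j] = ch
      · have hcond : ((j : Int) < (t.length : Int) ∧ PySem.List.pyGet? t (j : Int) = some ch) := by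
          refine ⟨by exact_mod_cast hjl, by rw [hget, hch]⟩
        rw [if_pos hcond]
        have : ((j : Int) + 1) = ((j + 1 : Nat) : Int) := by push_cast; ring
        rw [this, ih (j + 1) hjl, hdrop]
        simp [pvGreedy, hch]
      · have hcond : ¬ ((j : Int) < (t.length : Int) ∧ PySem.List.pyGet? t (j : Int) = some ch) := by
          rintro ⟨-, h2⟩
          rw [hget] at h2
          exact hch (Option.some.inj h2)
        rw [if_neg hcond, ih j hj, hdrop]
        simp [pvGreedy, hch]
    · have hje : j = t.length := by omega
      have hcond : ¬ ((j : Int) < (t.length : Int) ∧ PySem.List.pyGet? t (j : Int) = some ch) := by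
        rintro ⟨h1, -⟩
        exact hjl (by exact_mod_cast h1)
      rw [if_neg hcond, ih j hj]
      have hdrop : t.drop j = [] := by
        rw [hje]; simp
      rw [hdrop]
      simp [pvGreedy, pvGreedy_nil_right]

-- greedy subsequence matching is exact: the scan consumes all of t iff t is a sublist of pool
theorem pvGreedy_eq_nil_iff (pool t : List Char) : pvGreedy pool t = [] ↔ t.Sublist pool := by
  induction pool generalizing t with
  | nil =>
    simp [pvGreedy, List.sublist_nil]
  | cons ch pool ih =>
    cases t with
    | nil => simp [pvGreedy]
    | cons a t =>
      simp only [pvGreedy]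
      by_cases hch : a = ch
      · subst hch
        rw [if_pos rfl, ih, List.cons_sublist_cons]
      · rw [if_neg hch, ih]
        constructor
        · intro h; exact h.cons ch
        · intro h
          cases h with
          | cons _ h => exact h
          | cons₂ _ h => exact absurd rfl hch

-- A's all()-over-Counter test, in ∀-form over the characters of the word
theorem testA_iff (w : List Char) (chars : List Char) :
    (((PySem.Dict.counter w).keys.map
        (fun i => decide ((PySem.Dict.counter w).getD i 0 ≤ (PySem.Dict.counter chars).getD i 0))).all id) = true
    ↔ ∀ ch ∈ w, (w.count ch : Int) ≤ (chars.count ch : Int) := by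
  rw [List.all_eq_true]
  constructor
  · intro hAll c hcm
    have := hAll _ (List.mem_map.mpr ⟨c, by
      rw [PySem.Dict.keys_counter, PySem.Set.mem_ofList]; exact hcm, rfl⟩)
    simpa [PySem.Dict.getD_counter] using this
  · intro hAll b hb
    rcases List.mem_map.mp hb with ⟨i, hi, rfl⟩
    rw [PySem.Dict.keys_counter, PySem.Set.mem_ofList] at hi
    simpa [PySem.Dict.getD_counter] using hAll i hi

-- the per-word tests agree: Counter comparison = greedy scan of sorted word through sorted pool
theorem test_eq (w : List Char) (chars : List Char) :
    (((PySem.Dict.counter w).keys.map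
        (fun i => decide ((PySem.Dict.counter w).getD i 0 ≤ (PySem.Dict.counter chars).getD i 0))).all id)
    = decide ((PySem.List.sorted chars (fun c => c) false).foldl
        (fun j ch => if j < ((PySem.List.sorted w (fun c => c) false).length : Int) ∧
            PySem.List.pyGet? (PySem.List.sorted w (fun c => c) false) j = some ch then j + 1 else j) 0
        = ((PySem.List.sorted w (fun c => c) false).length : Int)) := by
  set pool := PySem.List.sorted chars (fun c => c) false with hpool
  set t := PySem.List.sorted w (fun c => c) false with ht
  have hfold := fold_eq_greedy pool t 0 (Nat.zero_le _)
  rw [Bool.eq_iff_iff, testA_iff, decide_eq_true_iff]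
  have hcast0 : ((0 : Nat) : Int) = (0 : Int) := rfl
  rw [← hcast0, hfold]
  simp only [List.drop_zero]
  constructor
  · intro hAll
    have hsub : t.Sublist pool := by
      apply List.sublist_of_subperm_of_pairwise (r := fun a b : Char => a ≤ b)
      · rw [List.subperm_iff_count]
        intro a
        have hcw : t.count a = w.count a := (PySem.List.sorted_perm w (fun c => c) false).count_eq a
        have hcc : pool.count a = chars.count a := (PySem.List.sorted_perm chars (fun c => c) false).count_eq a
        rw [hcw, hcc]
        by_cases ha : a ∈ w
        · exact_mod_cast hAll a ha
        · simp [List.count_eq_zero.mpr ha]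
      · exact PySem.List.sorted_pairwise w (fun c => c)
      · exact PySem.List.sorted_pairwise chars (fun c => c)
    rw [(pvGreedy_eq_nil_iff pool t).mpr hsub]
    simp
  · intro hlen
    have hnil : pvGreedy pool t = [] := by
      have : ((pvGreedy pool t).length : Int) = 0 := by omega
      exact List.length_eq_zero_iff.mp (by exact_mod_cast this)
    have hsub : t.Sublist pool := (pvGreedy_eq_nil_iff pool t).mp hnil
    intro ch hch
    have hcount := hsub.subperm.count_le ch
    have hcw : t.count ch = w.count ch := (PySem.List.sorted_perm w (fun c => c) false).count_eq ch
    have hcc : pool.count ch = chars.count ch := (PySem.List.sorted_perm chars (fun c => c) false).count_eq ch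
    rw [hcw, hcc] at hcount
    exact_mod_cast hcount

-- ===== VERDICT =====
theorem count_characters_2_spec : Claim_equal_count_characters_2 := by
  intro words chars _
  unfold Spec_count_characters_2 count_characters_2 count_characters_2_alt
  simp only []
  apply PySem.List.foldl_congr_mem
  intro acc w _
  rw [test_eq w.toList chars.toList]
  split <;> simp_all
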